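-- pv_equiv track=rewrite | github.com/shyambeer/Algorithms | listTranspose.py | listTranspose
-- ===== SOURCE A (Python) =====
-- def listTranspose(my_list):
--     count = len(my_list)
--     result = []
--     for i in range(count):
--         current = []
--         result.append(current)
--         for j in range(count):
--             if j < count and i < len(my_list[j]):
--                 current.append(my_list[j][i])
--
--     return result
-- ===== SOURCE B (Python) =====
-- def listTranspose(my_list):
--     count = len(my_list)
--     result = [[] for _ in range(count)]
--     for row in my_list:
--         for i, x in enumerate(row[:count]):
--             result[i].append(x)
--     return result
-- ===== Notes on version B (the rewrite author's own statement) =====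
-- stated objective: alternative
-- what changed: B pre-allocates the count output columns and scatters each input row into them in a single pass over the rows, instead of A's gather that rescans every row once per output index.
import Mathlib
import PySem

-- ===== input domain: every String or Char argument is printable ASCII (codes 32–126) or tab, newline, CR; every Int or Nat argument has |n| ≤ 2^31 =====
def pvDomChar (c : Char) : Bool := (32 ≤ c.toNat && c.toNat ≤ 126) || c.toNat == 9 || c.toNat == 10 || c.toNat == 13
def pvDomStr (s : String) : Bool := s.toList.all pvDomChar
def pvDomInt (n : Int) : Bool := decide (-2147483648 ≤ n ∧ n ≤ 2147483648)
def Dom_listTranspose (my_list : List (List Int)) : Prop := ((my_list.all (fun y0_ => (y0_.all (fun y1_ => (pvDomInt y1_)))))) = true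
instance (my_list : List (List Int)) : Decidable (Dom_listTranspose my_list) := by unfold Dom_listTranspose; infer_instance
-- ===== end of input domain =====

-- B scatters each input row once into pre-allocated output columns instead of A's per-column rescan of all rows; same return value everywhere.

-- ===== PORT A =====
-- my_list[j] (0 ≤ j < len(my_list)) and my_list[j][i] (guarded by i < len(my_list[j])) are always in range, so getD is exact here.
def listTranspose (my_list : List (List Int)) : List (List Int) :=
  let count := my_list.length
  (List.range count).foldl (fun result i =>
    result ++ [(List.range count).foldl (fun current j =>
      if j < count ∧ i < (my_list.getD j []).length then
        current ++ [(my_list.getD j []).getD i 0]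
      else current) []]) []

-- ===== PORT B =====
-- enumerate(row[:count]) ↦ (row.take count).zipIdx (value × index pairs; count = len ≥ 0 so the slice is take);
-- result[i].append(x) ↦ set i (getD i [] ++ [x]) — i is always < count = length result, so getD/set are exact.
def listTranspose_alt (my_list : List (List Int)) : List (List Int) :=
  let count := my_list.length
  my_list.foldl (fun result row =>
    ((row.take count).zipIdx).foldl
      (fun res p => res.set p.2 (res.getD p.2 [] ++ [p.1])) result)
    (List.replicate count [])

-- ===== PRECONDITION & SPEC =====
def Spec_listTranspose (my_list : List (List Int)) (out : List (List Int)) : Prop := out = listTranspose_alt my_list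
instance (my_list : List (List Int)) (out : List (List Int)) : Decidable (Spec_listTranspose my_list out) := by unfold Spec_listTranspose; infer_instance

-- ===== CLAIM (what is proved, stated in full; the proofs are below) =====
def Claim_equal_listTranspose : Prop := ∀ (my_list : List (List Int)), Dom_listTranspose my_list → Spec_listTranspose my_list (listTranspose my_list)

-- ===== LEMMAS AND PROOFS =====

-- common characterisation both ports are reduced to: column m of the transpose
def pvCol (my_list : List (List Int)) (m : Nat) : List Int :=
  my_list.filterMap (fun row => row[m]?)

theorem getD_set_ne (l : List (List Int)) (i j : Nat) (v : List Int) (h : i ≠ j) :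
    (l.set i v).getD j [] = l.getD j [] := by
  simp [List.getD_eq_getElem?_getD, List.getElem?_set_ne h]

theorem getD_set_self (l : List (List Int)) (i : Nat) (v : List Int) (h : i < l.length) :
    (l.set i v).getD i [] = v := by
  simp [List.getD_eq_getElem?_getD, List.getElem?_set_self h]

-- ---- B side: the scatter of one row, element by element ----

theorem scatter_length (xs : List Int) : ∀ (k : Nat) (res : List (List Int)),
    ((xs.zipIdx k).foldl (fun res p => res.set p.2 (res.getD p.2 [] ++ [p.1])) res).length = res.length := by
  induction xs with
  | nil => intro k res; simp
  | cons a t ih =>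
    intro k res
    rw [List.zipIdx_cons, List.foldl_cons, ih]
    simp

theorem scatter_getD (xs : List Int) : ∀ (k : Nat) (res : List (List Int)),
    k + xs.length ≤ res.length → ∀ m : Nat, m < res.length →
    ((xs.zipIdx k).foldl (fun res p => res.set p.2 (res.getD p.2 [] ++ [p.1])) res).getD m [] =
      if k ≤ m ∧ m < k + xs.length then res.getD m [] ++ [xs.getD (m - k) 0] else res.getD m [] := by
  induction xs with
  | nil => intro k res _ m _; simp
  | cons a t ih =>
    intro k res hlen m hm
    rw [List.zipIdx_cons, List.foldl_cons]
    simp only [List.length_cons] at hlen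
    dsimp only
    rw [ih (k+1) (res.set k (res.getD k [] ++ [a]))
        (by rw [List.length_set]; omega) m (by rw [List.length_set]; exact hm)]
    by_cases h1 : k + 1 ≤ m ∧ m < k + 1 + t.length
    · rw [if_pos h1, if_pos ⟨by omega, by simp only [List.length_cons]; omega⟩]
      rw [getD_set_ne _ _ _ _ (by omega)]
      rw [show m - k = (m - (k+1)) + 1 by omega, List.getD_cons_succ]
    · rw [if_neg h1]
      by_cases h2 : m = k
      · subst h2
        rw [if_pos ⟨by omega, by simp only [List.length_cons]; omega⟩]
        rw [getD_set_self _ _ _ hm]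
        simp
      · rw [if_neg (by simp only [List.length_cons]; omega)]
        rw [getD_set_ne _ _ _ _ (by omega)]

theorem b_fold_length (count : Nat) (rows : List (List Int)) : ∀ (res : List (List Int)),
    (rows.foldl (fun result row =>
      (((row.take count).zipIdx).foldl (fun res p => res.set p.2 (res.getD p.2 [] ++ [p.1])) result)) res).length = res.length := by
  induction rows with
  | nil => intro res; rfl
  | cons row rows ih => intro res; rw [List.foldl_cons, ih, scatter_length]

theorem b_fold_getD (count : Nat) (rows : List (List Int)) : ∀ (res : List (List Int)),
    res.length = count → ∀ m, m < count →
    (rows.foldl (fun result row =>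
      (((row.take count).zipIdx).foldl (fun res p => res.set p.2 (res.getD p.2 [] ++ [p.1])) result)) res).getD m []
    = res.getD m [] ++ pvCol rows m := by
  induction rows with
  | nil => intro res _ m _; simp [pvCol]
  | cons row rows ih =>
    intro res hres m hm
    rw [List.foldl_cons]
    rw [ih _ (by rw [scatter_length]; exact hres) m hm]
    rw [scatter_getD _ 0 _ (by simp only [List.length_take]; omega) m (by omega)]
    by_cases h : m < row.length
    · rw [if_pos ⟨Nat.zero_le _, by simp only [List.length_take, Nat.zero_add]; omega⟩]
      have ht : (row.take count).getD (m - 0) 0 = row.getD m 0 := by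
        simp [List.getD_eq_getElem?_getD, List.getElem?_take_of_lt hm]
      rw [ht]
      simp [pvCol, List.getElem?_eq_getElem h, List.append_assoc]
    · rw [if_neg (by simp only [List.length_take, Nat.zero_add]; omega)]
      simp [pvCol, List.getElem?_eq_none (show row.length ≤ m by omega)]

-- ---- A side: the gather loop for one output index ----

theorem innerA (g : Nat → List Int) (i : Nat) : ∀ (n : Nat) (acc : List Int),
    (List.range n).foldl (fun cur j => if i < (g j).length then cur ++ [(g j).getD i 0] else cur) acc
    = acc ++ (List.range n).filterMap (fun j => (g j)[i]?) := by
  intro n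
  induction n with
  | zero => intro acc; simp
  | succ n ih =>
    intro acc
    rw [List.range_succ, List.foldl_append, List.filterMap_append, ih]
    by_cases h : i < (g n).length
    · simp [h]
    · simp [h]

theorem range_filterMap (l : List (List Int)) (f : List Int → Option Int) :
    (List.range l.length).filterMap (fun j => f (l.getD j [])) = l.filterMap f := by
  induction l with
  | nil => simp
  | cons a t ih =>
    rw [List.length_cons, List.range_succ_eq_map, List.filterMap_cons, List.filterMap_map]
    simp only [List.getD_cons_zero, Function.comp_def, List.getD_cons_succ]
    rw [List.filterMap_cons]
    simp only [List.getD_eq_getElem?_getD] at ih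
    cases f a <;> simp [ih]

theorem listTranspose_eq_cols (my_list : List (List Int)) :
    listTranspose my_list = (List.range my_list.length).map (pvCol my_list) := by
  unfold listTranspose
  rw [PySem.List.foldl_append_singleton_eq_map]
  simp only [List.nil_append]
  apply List.map_congr_left
  intro i hi
  have hguard : ∀ (cur : List Int) (j : Nat), j ∈ List.range my_list.length →
      (if j < my_list.length ∧ i < (my_list.getD j []).length then
        cur ++ [(my_list.getD j []).getD i 0] else cur)
      = (if i < (my_list.getD j []).length then cur ++ [(my_list.getD j []).getD i 0] else cur) := by
    intro cur j hj
    rw [List.mem_range] at hj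
    by_cases h : i < (my_list.getD j []).length
    · rw [if_pos ⟨hj, h⟩, if_pos h]
    · rw [if_neg (by tauto), if_neg h]
  calc (List.range my_list.length).foldl (fun cur j =>
          if j < my_list.length ∧ i < (my_list.getD j []).length then
            cur ++ [(my_list.getD j []).getD i 0] else cur) []
      = (List.range my_list.length).foldl (fun cur j =>
          if i < (my_list.getD j []).length then cur ++ [(my_list.getD j []).getD i 0] else cur) [] := by
        exact PySem.List.foldl_congr_mem _ _ _ _ hguard
    _ = pvCol my_list i := by
        rw [innerA (fun j => my_list.getD j []) i my_list.length []]
        rw [List.nil_append]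
        exact range_filterMap my_list (fun row => row[i]?)

theorem listTranspose_alt_eq_cols (my_list : List (List Int)) :
    listTranspose_alt my_list = (List.range my_list.length).map (pvCol my_list) := by
  unfold listTranspose_alt
  apply List.ext_getElem
  · rw [b_fold_length]; simp
  · intro m h1 h2
    have hm : m < my_list.length := by rw [b_fold_length] at h1; simpa using h1
    have := b_fold_getD my_list.length my_list (List.replicate my_list.length []) (by simp) m hm
    rw [List.getD_eq_getElem _ _ h1] at this
    rw [this]
    simp [List.getD_eq_getElem?_getD]

-- ===== VERDICT (by name: the statement is the Claim_ definition above) =====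
theorem listTranspose_spec : Claim_equal_listTranspose := by
  intro my_list _
  unfold Spec_listTranspose
  rw [listTranspose_eq_cols, listTranspose_alt_eq_cols]
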